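-- pv_equiv track=rewrite | github.com/maschmann/symfony-php-mcp | src/symfony_mcp/tools/project.py | _categorise_packages
-- ===== SOURCE A (Python) =====
-- _CATEGORY_PREFIXES: dict[str, str] = {
--     "symfony/": "Symfony Components",
--     "doctrine/": "Doctrine / Database",
--     "api-platform/": "API Platform",
--     "league/": "League",
--     "nelmio/": "Nelmio",
--     "knplabs/": "KNP Labs",
--     "stof/": "StofDoctrineExtensions",
--     "jms/": "JMS",
--     "friendsofsymfony/": "FriendsOfSymfony",
--     "easycorp/": "EasyAdmin / EasyCorp",
--     "liip/": "Liip",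
--     "lexik/": "Lexik",
--     "scheb/": "Scheb",
--     "sensio/": "Sensio Labs",
--     "twig/": "Twig",
--     "monolog/": "Logging",
--     "guzzlehttp/": "HTTP Client",
--     "symfony/messenger": "Messaging",
-- }
--
-- def _categorise_packages(packages: dict[str, str]) -> dict[str, dict[str, str]]:
--     """Group packages by category prefix."""
--     result: dict[str, dict[str, str]] = {}
--
--     for pkg, ver in packages.items():
--         category = "Other"
--         for prefix, cat_name in _CATEGORY_PREFIXES.items():
--             if pkg.startswith(prefix):
--                 category = cat_name
--                 break
--         result.setdefault(category, {})[pkg] = ver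
--
--     return result
-- ===== SOURCE B (Python) =====
-- _CATEGORY_PREFIXES: dict[str, str] = {
--     "symfony/": "Symfony Components",
--     "doctrine/": "Doctrine / Database",
--     "api-platform/": "API Platform",
--     "league/": "League",
--     "nelmio/": "Nelmio",
--     "knplabs/": "KNP Labs",
--     "stof/": "StofDoctrineExtensions",
--     "jms/": "JMS",
--     "friendsofsymfony/": "FriendsOfSymfony",
--     "easycorp/": "EasyAdmin / EasyCorp",
--     "liip/": "Liip",
--     "lexik/": "Lexik",
--     "scheb/": "Scheb",
--     "sensio/": "Sensio Labs",
--     "twig/": "Twig",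
--     "monolog/": "Logging",
--     "guzzlehttp/": "HTTP Client",
--     "symfony/messenger": "Messaging",
-- }
--
--
-- def _categorise_packages(packages: dict[str, str]) -> dict[str, dict[str, str]]:
--     """Group packages by category: tag each with its vendor's category, then group by tag."""
--     tagged = [
--         (_CATEGORY_PREFIXES.get(pkg[: pkg.find("/") + 1], "Other"), pkg, ver)
--         for pkg, ver in packages.items()
--     ]
--     result: dict[str, dict[str, str]] = {}
--     for cat, _, _ in tagged:
--         if cat not in result:
--             result[cat] = {pkg: ver for c, pkg, ver in tagged if c == cat}
--     return result
-- ===== Notes on version B (the rewrite author's own statement) =====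
-- stated objective: alternative
-- what changed: A scans the 18 prefixes with startswith/break per package and grows each category dict incrementally via setdefault; B first tags every package with its category by one vendor-key dict lookup (pkg[:pkg.find('/')+1]), then groups: at a category's first occurrence it builds that category's whole inner dict by filtering the tagged list.
import Mathlib
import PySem

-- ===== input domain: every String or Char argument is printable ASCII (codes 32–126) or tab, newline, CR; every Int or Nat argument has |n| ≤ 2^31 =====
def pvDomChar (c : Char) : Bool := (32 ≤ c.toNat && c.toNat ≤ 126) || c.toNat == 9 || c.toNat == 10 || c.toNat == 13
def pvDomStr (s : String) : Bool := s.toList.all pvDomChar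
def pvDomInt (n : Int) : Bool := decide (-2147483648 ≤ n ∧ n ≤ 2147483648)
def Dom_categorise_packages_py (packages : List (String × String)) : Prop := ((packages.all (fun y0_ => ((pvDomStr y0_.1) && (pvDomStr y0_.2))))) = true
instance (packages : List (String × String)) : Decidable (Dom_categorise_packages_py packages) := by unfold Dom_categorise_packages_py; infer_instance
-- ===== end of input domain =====

-- B replaces A's per-package inner scan over the 18 prefixes (startswith + break) and incremental
-- setdefault-grouping by a tag-then-group-by pipeline: tag each package with its category via one
-- vendor-key dict lookup, then build each category's whole inner dict at its first occurrence by
-- filtering the tagged list  (objective: alternative).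

-- shared module constant _CATEGORY_PREFIXES
def pvCategoryPrefixes : PySem.Dict String String := PySem.Dict.ofList [
  ("symfony/", "Symfony Components"),
  ("doctrine/", "Doctrine / Database"),
  ("api-platform/", "API Platform"),
  ("league/", "League"),
  ("nelmio/", "Nelmio"),
  ("knplabs/", "KNP Labs"),
  ("stof/", "StofDoctrineExtensions"),
  ("jms/", "JMS"),
  ("friendsofsymfony/", "FriendsOfSymfony"),
  ("easycorp/", "EasyAdmin / EasyCorp"),
  ("liip/", "Liip"),
  ("lexik/", "Lexik"),
  ("scheb/", "Scheb"),
  ("sensio/", "Sensio Labs"),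
  ("twig/", "Twig"),
  ("monolog/", "Logging"),
  ("guzzlehttp/", "HTTP Client"),
  ("symfony/messenger", "Messaging")]

-- ===== PORT A =====
-- A's inner loop: `for prefix, cat_name in _CATEGORY_PREFIXES.items(): if pkg.startswith(prefix): category = cat_name; break`
def pvCatLoopA (pkg : String) : List (String × String) → String
  | [] => "Other"
  | (pre, catName) :: rest =>
      if PySem.Str.startswith pkg pre then catName else pvCatLoopA pkg rest

def categorise_packages_py (packages : List (String × String)) : List (String × List (String × String)) :=
  let result : PySem.Dict String (PySem.Dict String String) :=
    packages.foldl (fun r pv =>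
      let category := pvCatLoopA pv.1 pvCategoryPrefixes.items
      -- result.setdefault(category, {})[pkg] = ver
      r.modify category PySem.Dict.empty (fun inner => inner.insert pv.1 pv.2))
      PySem.Dict.empty
  result.items.map (fun p => (p.1, p.2.items))

-- ===== PORT B =====
-- B's category tag: _CATEGORY_PREFIXES.get(pkg[: pkg.find("/") + 1], "Other")
def pvCatB (pkg : String) : String :=
  pvCategoryPrefixes.getD (PySem.Str.slice pkg none (some (PySem.Str.find pkg "/" + 1))) "Other"

def categorise_packages_py_alt (packages : List (String × String)) : List (String × List (String × String)) :=
  -- tagged = [(category, pkg, ver) …]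
  let tagged : List (String × String × String) :=
    packages.map (fun pv => (pvCatB pv.1, pv.1, pv.2))
  -- for cat, _, _ in tagged: if cat not in result: result[cat] = {pkg: ver for c, pkg, ver in tagged if c == cat}
  let result : PySem.Dict String (PySem.Dict String String) :=
    tagged.foldl (fun res t =>
      if res.contains t.1 then res
      else res.insert t.1
        ((tagged.filter (fun s => s.1 == t.1)).foldl
          (fun d s => d.insert s.2.1 s.2.2) PySem.Dict.empty))
      PySem.Dict.empty
  result.items.map (fun p => (p.1, p.2.items))

-- ===== PRECONDITION & SPEC =====
def Spec_categorise_packages_py (packages : List (String × String)) (out : List (String × List (String × String))) : Prop := out = categorise_packages_py_alt packages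
instance (packages : List (String × String)) (out : List (String × List (String × String))) : Decidable (Spec_categorise_packages_py packages out) := by unfold Spec_categorise_packages_py; infer_instance

-- ===== CLAIM (what is proved, stated in full; the proofs are below) =====
def Claim_equal_categorise_packages_py : Prop := ∀ (packages : List (String × String)), Dom_categorise_packages_py packages → Spec_categorise_packages_py packages (categorise_packages_py packages)

-- ===== LEMMAS AND PROOFS =====

theorem pvItems_eq : pvCategoryPrefixes.items = [
  ("symfony/", "Symfony Components"),
  ("doctrine/", "Doctrine / Database"),
  ("api-platform/", "API Platform"),
  ("league/", "League"),
  ("nelmio/", "Nelmio"),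
  ("knplabs/", "KNP Labs"),
  ("stof/", "StofDoctrineExtensions"),
  ("jms/", "JMS"),
  ("friendsofsymfony/", "FriendsOfSymfony"),
  ("easycorp/", "EasyAdmin / EasyCorp"),
  ("liip/", "Liip"),
  ("lexik/", "Lexik"),
  ("scheb/", "Scheb"),
  ("sensio/", "Sensio Labs"),
  ("twig/", "Twig"),
  ("monolog/", "Logging"),
  ("guzzlehttp/", "HTTP Client"),
  ("symfony/messenger", "Messaging")] := by decide

theorem pvDict_mk : pvCategoryPrefixes = PySem.Dict.mk pvCategoryPrefixes.items := by decide

-- Python startswith as list-prefix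
theorem pvStartswith_iff (s p : String) : PySem.Str.startswith s p = true ↔ p.toList <+: s.toList := by
  rw [PySem.Str.startswith_eq, PySem.Chars.startswith_iff]

-- If the first '/' of cs sits at index n, then a '/‑terminated vendor prefix v++['/'] is a
-- prefix of cs exactly when it equals cs.take (n+1).
theorem pvKeyEq (cs : List Char) (n : Nat)
    (hpre : ['/'] <+: cs.drop n)
    (hmin : ∀ j, j < n → ¬ ['/'] <+: cs.drop j)
    (v : List Char) (hv : '/' ∉ v) :
    ((v ++ ['/']) <+: cs) ↔ cs.take (n + 1) = v ++ ['/'] := by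
  constructor
  · rintro ⟨t, ht⟩
    have hcs : cs = v ++ ('/' :: t) := by rw [← ht]; simp
    have h1 : ['/'] <+: cs.drop v.length := by
      rw [hcs, List.drop_left]; exact ⟨t, rfl⟩
    have hle : n ≤ v.length := by
      by_contra hgt
      exact hmin v.length (by omega) h1
    have hge : v.length ≤ n := by
      by_contra hgt
      have hn : n < v.length := by omega
      have hdrop : cs.drop n = v[n] :: (v.drop (n+1) ++ ('/' :: t)) := by
        rw [hcs, List.drop_append_of_le_length (by omega)]
        conv_lhs => rw [List.drop_eq_getElem_cons hn]
        rw [List.cons_append]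
      rw [hdrop] at hpre
      obtain ⟨t', ht', -⟩ := List.cons_prefix_iff.mp hpre
      have : v[n] = '/' := by
        have := congrArg (·.head?) ht'
        simpa using this
      exact hv (this ▸ List.getElem_mem hn)
    have hn : n = v.length := le_antisymm hle hge
    subst hn
    rw [hcs]
    have : v.length + 1 = (v ++ ['/']).length := by simp
    rw [show v ++ ('/' :: t) = (v ++ ['/']) ++ t by simp, this, List.take_left]
  · intro h
    rw [← h]; exact List.take_prefix _ _

-- For a '/'-terminated prefix with no earlier '/', startswith equals key equality.
theorem pvVendorIff (pkg keyStr : String) (n : Nat)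
    (hpre : ['/'] <+: pkg.toList.drop n)
    (hmin : ∀ j, j < n → ¬ ['/'] <+: pkg.toList.drop j)
    (hkey : keyStr.toList = pkg.toList.take (n + 1))
    (p : String)
    (hlast : p.toList.getLast? = some '/')
    (hv : '/' ∉ p.toList.dropLast) :
    (PySem.Str.startswith pkg p = true ↔ keyStr = p) := by
  have hsplit : p.toList.dropLast ++ ['/'] = p.toList :=
    List.dropLast_append_getLast? '/' hlast
  rw [pvStartswith_iff, ← hsplit, pvKeyEq pkg.toList n hpre hmin _ hv]
  constructor
  · intro h
    apply String.toList_inj.mp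
    rw [hkey, h, hsplit]
  · intro h
    rw [← hkey, h]
    exact hsplit.symm

-- aligned scan: A's first-match scan equals a dict lookup when every entry's
-- startswith test is equivalent to key equality
theorem pvScanEq (pkg keyStr : String) :
    ∀ l : List (String × String),
      (∀ pc ∈ l, (PySem.Str.startswith pkg pc.1 = true ↔ keyStr = pc.1)) →
      pvCatLoopA pkg l = ((PySem.Dict.mk l).get? keyStr).getD "Other"
  | [], _ => by simp [pvCatLoopA, PySem.Dict.get?]
  | (p, c) :: rest, h => by
      have hh := h (p, c) (List.mem_cons_self ..)
      rw [pvCatLoopA, PySem.Dict.get?_mk_cons]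
      by_cases he : keyStr = p
      · have hs : PySem.Str.startswith pkg p = true := hh.mpr he
        rw [hs, he]
        simp
      · have hs : PySem.Str.startswith pkg p = false := by
          rcases Bool.eq_false_or_eq_true (PySem.Str.startswith pkg p) with h' | h'
          · exact absurd (hh.mp h') he
          · exact h'
        have hb : (p == keyStr) = false := by
          simp only [beq_eq_false_iff_ne]; exact fun e => he e.symm
        rw [hs, hb]
        simp only [Bool.false_eq_true, if_false]
        exact pvScanEq pkg keyStr rest (fun pc hpc => h pc (List.mem_cons_of_mem _ hpc))

-- no '/' in the package name: no prefix matches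
theorem pvScanOther (pkg : String) (hno : '/' ∉ pkg.toList) :
    ∀ l : List (String × String),
      (∀ pc ∈ l, '/' ∈ pc.1.toList) →
      pvCatLoopA pkg l = "Other"
  | [], _ => rfl
  | (p, c) :: rest, h => by
      have hs : PySem.Str.startswith pkg p = false := by
        rcases Bool.eq_false_or_eq_true (PySem.Str.startswith pkg p) with h' | h'
        · exact absurd ((pvStartswith_iff pkg p).mp h' |>.subset (h (p, c) (List.mem_cons_self ..))) hno
        · exact h'
      rw [pvCatLoopA, hs]
      simp only [Bool.false_eq_true, if_false]
      exact pvScanOther pkg hno rest (fun pc hpc => h pc (List.mem_cons_of_mem _ hpc))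

-- the central per-package lemma: A's category = B's category tag
theorem pvCat_eq (pkg : String) : pvCatLoopA pkg pvCategoryPrefixes.items = pvCatB pkg := by
  unfold pvCatB
  have hfind : PySem.Str.find pkg "/" = PySem.Chars.find pkg.toList ['/'] := by
    simp [PySem.Str.find_eq]
  by_cases hge : 0 ≤ PySem.Chars.find pkg.toList ['/']
  · -- a '/' occurs; n = index of the first one
    set i := PySem.Chars.find pkg.toList ['/'] with hi
    set n := i.toNat with hn
    have hin : i = (n : Int) := by omega
    obtain ⟨hpre, hmin⟩ := PySem.Chars.find_spec (s := pkg.toList) (sub := ['/']) hge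
    set keyStr := PySem.Str.slice pkg none (some (PySem.Str.find pkg "/" + 1)) with hk
    have hkey : keyStr.toList = pkg.toList.take (n + 1) := by
      rw [hk, hfind]
      simp only [PySem.Str.toList_slice, PySem.Chars.slice_eq_listSlice]
      rw [hin, show ((n : Int) + 1) = ((n + 1 : Nat) : Int) by push_cast; ring,
        PySem.List.slice_to_natCast]
    by_cases hs : PySem.Str.startswith pkg "symfony/" = true
    · -- first entry matches and breaks; B's key is exactly "symfony/"
      have hkeq : keyStr = "symfony/" :=
        (pvVendorIff pkg keyStr n hpre hmin hkey "symfony/" (by decide) (by decide)).mp hs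
      rw [pvItems_eq, pvCatLoopA, hs, if_pos rfl, hkeq]
      decide
    · -- pkg does not start with "symfony/": every entry's test ↔ key equality
      rw [pvDict_mk, PySem.Dict.getD_eq_get?_getD]
      apply pvScanEq pkg keyStr
      rw [pvItems_eq]
      have hmess : PySem.Str.startswith pkg "symfony/messenger" = false := by
        rcases Bool.eq_false_or_eq_true (PySem.Str.startswith pkg "symfony/messenger") with h' | h'
        · exact absurd ((pvStartswith_iff ..).mpr
            (List.IsPrefix.trans (by decide) ((pvStartswith_iff ..).mp h'))) hs
        · exact h'
      have hmessKey : keyStr ≠ "symfony/messenger" := by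
        intro he
        have hpfx : ("symfony/messenger" : String).toList <+: pkg.toList := by
          rw [← he, hkey]; exact List.take_prefix _ _
        exact hs ((pvStartswith_iff ..).mpr (List.IsPrefix.trans (by decide) hpfx))
      intro pc hpc
      fin_cases hpc
      · exact pvVendorIff pkg keyStr n hpre hmin hkey _ (by decide) (by decide)
      · exact pvVendorIff pkg keyStr n hpre hmin hkey _ (by decide) (by decide)
      · exact pvVendorIff pkg keyStr n hpre hmin hkey _ (by decide) (by decide)
      · exact pvVendorIff pkg keyStr n hpre hmin hkey _ (by decide) (by decide)
      · exact pvVendorIff pkg keyStr n hpre hmin hkey _ (by decide) (by decide)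
      · exact pvVendorIff pkg keyStr n hpre hmin hkey _ (by decide) (by decide)
      · exact pvVendorIff pkg keyStr n hpre hmin hkey _ (by decide) (by decide)
      · exact pvVendorIff pkg keyStr n hpre hmin hkey _ (by decide) (by decide)
      · exact pvVendorIff pkg keyStr n hpre hmin hkey _ (by decide) (by decide)
      · exact pvVendorIff pkg keyStr n hpre hmin hkey _ (by decide) (by decide)
      · exact pvVendorIff pkg keyStr n hpre hmin hkey _ (by decide) (by decide)
      · exact pvVendorIff pkg keyStr n hpre hmin hkey _ (by decide) (by decide)
      · exact pvVendorIff pkg keyStr n hpre hmin hkey _ (by decide) (by decide)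
      · exact pvVendorIff pkg keyStr n hpre hmin hkey _ (by decide) (by decide)
      · exact pvVendorIff pkg keyStr n hpre hmin hkey _ (by decide) (by decide)
      · exact pvVendorIff pkg keyStr n hpre hmin hkey _ (by decide) (by decide)
      · exact pvVendorIff pkg keyStr n hpre hmin hkey _ (by decide) (by decide)
      · exact ⟨fun h' => absurd (hmess.symm.trans (show PySem.Str.startswith pkg "symfony/messenger" = true from h')) Bool.false_ne_true,
          fun h' => absurd h' hmessKey⟩
  · -- no '/' in pkg: both sides are "Other"
    have hneg : PySem.Chars.find pkg.toList ['/'] = -1 := by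
      have := PySem.Chars.neg_one_le_find pkg.toList ['/']
      omega
    have hno : '/' ∉ pkg.toList := by
      have := (PySem.Chars.find_eq_neg_one_iff pkg.toList ['/']).mp hneg
      simpa [List.singleton_infix_iff] using this
    have hA : pvCatLoopA pkg pvCategoryPrefixes.items = "Other" := by
      apply pvScanOther pkg hno
      rw [pvItems_eq]
      intro pc hpc
      fin_cases hpc <;> decide
    have hkeyNil : (PySem.Str.slice pkg none (some (PySem.Str.find pkg "/" + 1))).toList = [] := by
      rw [hfind, hneg]
      simp only [PySem.Str.toList_slice, PySem.Chars.slice_eq_listSlice]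
      rw [show (-1 : Int) + 1 = ((0 : Nat) : Int) by ring, PySem.List.slice_to_natCast]
      simp
    have hkeyEmpty : PySem.Str.slice pkg none (some (PySem.Str.find pkg "/" + 1)) = "" :=
      String.toList_inj.mp (by rw [hkeyNil]; rfl)
    rw [hA, hkeyEmpty]
    decide

-- ===== grouping lemmas =====

-- A's modify-fold, looked up at a fixed category c, is the insert-fold over the matching packages
theorem pvAFoldGetD (k : String × String → String) (c : String) :
    ∀ (l : List (String × String)) (d : PySem.Dict String (PySem.Dict String String)),
    (l.foldl (fun r pv => r.modify (k pv) PySem.Dict.empty (fun inner => inner.insert pv.1 pv.2)) d).getD c PySem.Dict.empty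
    = (l.filter (fun pv => k pv == c)).foldl (fun inner pv => inner.insert pv.1 pv.2) (d.getD c PySem.Dict.empty)
  | [], d => rfl
  | pv :: l, d => by
      rw [List.foldl_cons, pvAFoldGetD k c l, List.filter_cons]
      by_cases h : k pv = c
      · simp [h, PySem.Dict.getD_modify (f := fun inner => PySem.Dict.insert inner pv.1 pv.2)]
      · have hb : (k pv == c) = false := by simpa using h
        simp [hb, PySem.Dict.getD_modify, Ne.symm h]

-- B's guarded-insert fold: keys are the first occurrences of the tags, in order
theorem pvBKeys (g : String → PySem.Dict String String) :
    ∀ (l : List (String × String × String)) (d : PySem.Dict String (PySem.Dict String String)),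
    (l.foldl (fun res t => if res.contains t.1 then res else res.insert t.1 (g t.1)) d).keys
    = PySem.Set.update d.keys (l.map (·.1))
  | [], d => rfl
  | t :: l, d => by
      rw [List.foldl_cons, List.map_cons, pvBKeys g l]
      have hupd : ∀ s x, PySem.Set.update s (x :: l.map (·.1)) = PySem.Set.update (PySem.Set.add s x) (l.map (·.1)) := by
        intro s x; rfl
      by_cases h : d.contains t.1 = true
      · rw [if_pos h, hupd]
        congr 1
        have hm : t.1 ∈ d.keys := (PySem.Dict.contains_iff_mem_keys ..).mp h
        simp [PySem.Set.add, PySem.Set.contains, hm]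
      · rw [if_neg h, hupd]
        congr 1
        have hm : t.1 ∉ d.keys := fun hmem => h ((PySem.Dict.contains_iff_mem_keys ..).mpr hmem)
        rw [PySem.Dict.keys_insert_of_not_contains _ (g t.1) (by simpa using h)]
        simp [PySem.Set.add, PySem.Set.contains, hm]

theorem pvBNodup (g : String → PySem.Dict String String) :
    ∀ (l : List (String × String × String)) (d : PySem.Dict String (PySem.Dict String String)),
    d.keys.Nodup →
    (l.foldl (fun res t => if res.contains t.1 then res else res.insert t.1 (g t.1)) d).keys.Nodup
  | [], d, h => h
  | t :: l, d, h => by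
      rw [List.foldl_cons]
      by_cases hc : d.contains t.1 = true
      · rw [if_pos hc]; exact pvBNodup g l d h
      · rw [if_neg hc]
        exact pvBNodup g l _ (PySem.Dict.nodup_keys_insert _ _ _ h)

-- B's guarded-insert fold, looked up at c: the value written at c's first occurrence
theorem pvBGetD (g : String → PySem.Dict String String) (c : String) (e : PySem.Dict String String) :
    ∀ (l : List (String × String × String)) (d : PySem.Dict String (PySem.Dict String String)),
    (l.foldl (fun res t => if res.contains t.1 then res else res.insert t.1 (g t.1)) d).getD c e
    = if d.contains c = true then d.getD c e else if c ∈ l.map (·.1) then g c else e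
  | [], d => by
      by_cases h : d.contains c = true
      · simp [h]
      · rw [List.foldl_nil, if_neg h, PySem.Dict.getD_of_not_contains _ e (by simpa using h)]
        simp
  | t :: l, d => by
      rw [List.foldl_cons, pvBGetD g c e l, List.map_cons]
      by_cases hc : d.contains t.1 = true
      · rw [if_pos hc]
        by_cases hdc : d.contains c = true
        · rw [if_pos hdc, if_pos hdc]
        · rw [if_neg hdc, if_neg hdc]
          by_cases hct : c = t.1
          · exact absurd (hct ▸ hc) hdc
          · by_cases hm : c ∈ List.map (fun x => x.1) l
            · rw [if_pos hm, if_pos (List.mem_cons_of_mem _ hm)]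
            · rw [if_neg hm, if_neg (by simp [List.mem_cons, hct, hm])]
      · rw [if_neg hc]
        by_cases hct : c = t.1
        · subst hct
          rw [if_pos (PySem.Dict.contains_insert_self ..), PySem.Dict.getD_insert_self,
            if_neg hc, if_pos (List.mem_cons_self ..)]
        · have hbeq : (c == t.1) = false := by simpa using hct
          have hci : (d.insert t.1 (g t.1)).contains c = d.contains c := by
            rw [PySem.Dict.contains_insert, hbeq, Bool.false_or]
          rw [hci]
          by_cases hdc : d.contains c = true
          · rw [if_pos hdc, if_pos hdc, PySem.Dict.getD_insert_of_ne _ (g t.1) e hct]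
          · rw [if_neg hdc, if_neg hdc]
            by_cases hm : c ∈ List.map (fun x => x.1) l
            · rw [if_pos hm, if_pos (List.mem_cons_of_mem _ hm)]
            · rw [if_neg hm, if_neg (by simp [List.mem_cons, hct, hm])]

theorem pvBGetD_empty_cases (g : String → PySem.Dict String String) (c : String) (e : PySem.Dict String String)
    (l : List (String × String × String)) (hc : c ∈ l.map (·.1)) :
    (l.foldl (fun res t => if res.contains t.1 then res else res.insert t.1 (g t.1)) PySem.Dict.empty).getD c e = g c := by
  rw [pvBGetD g c e l PySem.Dict.empty]
  simp [PySem.Dict.contains_empty, hc]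

theorem pvAvalue (packages : List (String × String)) (c : String) :
    (packages.foldl (fun r pv =>
      r.modify (pvCatLoopA pv.1 pvCategoryPrefixes.items) PySem.Dict.empty (fun inner => inner.insert pv.1 pv.2))
      PySem.Dict.empty).getD c PySem.Dict.empty
    = (packages.filter (fun pv => pvCatB pv.1 == c)).foldl (fun inner pv => inner.insert pv.1 pv.2) PySem.Dict.empty := by
  have h := pvAFoldGetD (fun pv => pvCatLoopA pv.1 pvCategoryPrefixes.items) c packages PySem.Dict.empty
  refine h.trans ?_
  have hfilt : packages.filter (fun pv => pvCatLoopA pv.1 pvCategoryPrefixes.items == c)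
      = packages.filter (fun pv => pvCatB pv.1 == c) := by
    apply List.filter_congr
    intro pv _
    rw [pvCat_eq pv.1]
  rw [hfilt, PySem.Dict.getD_empty]

theorem pvGval (packages : List (String × String)) (c : String) :
    (((packages.map (fun pv => (pvCatB pv.1, pv.1, pv.2))).filter (fun s => s.1 == c)).foldl
        (fun d s => d.insert s.2.1 s.2.2) PySem.Dict.empty)
    = (packages.filter (fun pv => pvCatB pv.1 == c)).foldl (fun inner pv => inner.insert pv.1 pv.2) PySem.Dict.empty := by
  rw [List.filter_map, List.foldl_map]
  rfl

-- ===== VERDICT (by name: the statement is the Claim_ definition above) =====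
set_option maxHeartbeats 1600000 in
theorem categorise_packages_py_spec : Claim_equal_categorise_packages_py := by
  intro packages _
  show categorise_packages_py packages = categorise_packages_py_alt packages
  unfold categorise_packages_py categorise_packages_py_alt
  set tagged : List (String × String × String) := packages.map (fun pv => (pvCatB pv.1, pv.1, pv.2)) with ht
  set g : String → PySem.Dict String String := fun c =>
    (tagged.filter (fun s => s.1 == c)).foldl (fun d s => d.insert s.2.1 s.2.2) PySem.Dict.empty with hg
  -- B's fold body, written through g
  have hBbody : (fun (res : PySem.Dict String (PySem.Dict String String)) (t : String × String × String) =>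
      if res.contains t.1 then res
      else res.insert t.1 ((tagged.filter (fun s => s.1 == t.1)).foldl (fun d s => d.insert s.2.1 s.2.2) PySem.Dict.empty))
      = (fun res t => if res.contains t.1 then res else res.insert t.1 (g t.1)) := rfl
  simp only [hBbody]
  set dA : PySem.Dict String (PySem.Dict String String) :=
    packages.foldl (fun r pv =>
      r.modify (pvCatLoopA pv.1 pvCategoryPrefixes.items) PySem.Dict.empty (fun inner => inner.insert pv.1 pv.2))
      PySem.Dict.empty with hdA
  set dB : PySem.Dict String (PySem.Dict String String) :=
    tagged.foldl (fun res t => if res.contains t.1 then res else res.insert t.1 (g t.1)) PySem.Dict.empty with hdB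
  -- both dicts list the same categories: first occurrences of the tags, in order
  have hkA : dA.keys = PySem.Set.ofList (packages.map (fun pv => pvCatB pv.1)) := by
    rw [hdA]
    have h := PySem.Dict.keys_foldl_modify_key (ν := PySem.Dict String String) packages
      (fun pv => pvCatLoopA pv.1 pvCategoryPrefixes.items) PySem.Dict.empty
      (fun _ pv inner => inner.insert pv.1 pv.2) PySem.Dict.empty
    refine h.trans ?_
    have hmap : packages.map (fun pv => pvCatLoopA pv.1 pvCategoryPrefixes.items) = packages.map (fun pv => pvCatB pv.1) :=
      List.map_congr_left (fun pv _ => pvCat_eq pv.1)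
    rw [PySem.Dict.keys_empty, hmap]
    rfl
  have hkB : dB.keys = PySem.Set.ofList (packages.map (fun pv => pvCatB pv.1)) := by
    rw [hdB, pvBKeys g tagged PySem.Dict.empty, PySem.Dict.keys_empty, ht, List.map_map]
    rfl
  have hndA : dA.keys.Nodup := by
    rw [hdA]
    exact PySem.Dict.nodup_keys_foldl_modify_key packages
      (fun pv => pvCatLoopA pv.1 pvCategoryPrefixes.items) PySem.Dict.empty
      (fun _ pv inner => inner.insert pv.1 pv.2) PySem.Dict.empty (by simp)
  have hndB : dB.keys.Nodup := by
    rw [hdB]; exact pvBNodup g tagged PySem.Dict.empty (by simp)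
  -- items via keys, then compare category by category
  rw [PySem.Dict.items_eq_map_keys dA hndA PySem.Dict.empty,
      PySem.Dict.items_eq_map_keys dB hndB PySem.Dict.empty, hkA, hkB, List.map_map, List.map_map]
  apply List.map_congr_left
  intro c hc
  rw [PySem.Set.mem_ofList] at hc
  have hcT : c ∈ tagged.map (·.1) := by
    rw [ht, List.map_map]; exact hc
  have hvA : dA.getD c PySem.Dict.empty
      = (packages.filter (fun pv => pvCatB pv.1 == c)).foldl (fun inner pv => inner.insert pv.1 pv.2) PySem.Dict.empty := by
    rw [hdA]; exact pvAvalue packages c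
  have hvB : dB.getD c PySem.Dict.empty = g c := by
    rw [hdB]; exact pvBGetD_empty_cases g c PySem.Dict.empty tagged hcT
  have hgc : g c
      = (packages.filter (fun pv => pvCatB pv.1 == c)).foldl (fun inner pv => inner.insert pv.1 pv.2) PySem.Dict.empty := by
    rw [hg]
    show (tagged.filter (fun s => s.1 == c)).foldl (fun d s => d.insert s.2.1 s.2.2) PySem.Dict.empty
      = (packages.filter (fun pv => pvCatB pv.1 == c)).foldl (fun inner pv => inner.insert pv.1 pv.2) PySem.Dict.empty
    rw [ht]
    exact pvGval packages c
  simp only [Function.comp]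
  rw [hvA, hvB, hgc]
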